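-- pv_equiv track=rewrite | github.com/pex-tool/pex | pex/pep425tags.py | get_darwin_arches
-- ===== SOURCE A (Python) =====
-- def get_darwin_arches(major, minor, machine):
--   """Return a list of supported arches (including group arches) for
--   the given major, minor and machine architecture of an macOS machine.
--   """
--   arches = []
--
--   def _supports_arch(major, minor, arch):
--     # Looking at the application support for macOS versions in the chart
--     # provided by https://en.wikipedia.org/wiki/OS_X#Versions it appears
--     # our timeline looks roughly like:
--     #
--     # 10.0 - Introduces ppc support.
--     # 10.4 - Introduces ppc64, i386, and x86_64 support, however the ppc64
--     #    and x86_64 support is CLI only, and cannot be used for GUI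
--     #    applications.
--     # 10.5 - Extends ppc64 and x86_64 support to cover GUI applications.
--     # 10.6 - Drops support for ppc64
--     # 10.7 - Drops support for ppc
--     #
--     # Note: The above information is taken from the "Application support"
--     #     column in the chart not the "Processor support" since I believe
--     #     that we care about what instruction sets an application can use
--     #     not which processors the OS supports.
--     if arch == 'ppc':
--       return (major, minor) <= (10, 5)
--     if arch == 'ppc64':
--       return (major, minor) == (10, 5)
--     if arch == 'i386':
--       return (major, minor) >= (10, 4)
--     if arch == 'x86_64':
--       return (major, minor) >= (10, 4)
--     if arch in groups:
--       for garch in groups_dict[arch]: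
--         if _supports_arch(major, minor, garch):
--           return True
--     return False
--
--   groups = ('fat', 'intel', 'fat64', 'fat32')
--   groups_dict = {'fat': ('i386', 'ppc'),
--                  'intel': ('x86_64', 'i386'),
--                  'fat64': ('x86_64', 'ppc64'),
--                  'fat32': ('x86_64', 'i386', 'ppc')}
--
--   if _supports_arch(major, minor, machine):
--     arches.append(machine)
--
--   for garch in groups:
--     if machine in groups_dict[garch] and _supports_arch(major, minor, garch):
--       arches.append(garch)
--
--   arches.append('universal')
--
--   return arches
-- ===== SOURCE B (Python) =====
-- def get_darwin_arches(major, minor, machine):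
--     """Return a list of supported arches (including group arches) for
--     the given major, minor and machine architecture of an macOS machine.
--     """
--     supported = set()
--     if (major, minor) <= (10, 5):
--         supported.add('ppc')
--     if (major, minor) == (10, 5):
--         supported.add('ppc64')
--     if (major, minor) >= (10, 4):
--         supported.update(('i386', 'x86_64'))
--
--     groups = (('fat', ('i386', 'ppc')),
--               ('intel', ('x86_64', 'i386')),
--               ('fat64', ('x86_64', 'ppc64')),
--               ('fat32', ('x86_64', 'i386', 'ppc')))
--     groups_dict = dict(groups)
--
--     arches = []
--     if machine in supported or (
--             machine in groups_dict and supported.intersection(groups_dict[machine])):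
--         arches.append(machine)
--     for name, members in groups:
--         if machine in members and supported.intersection(members):
--             arches.append(name)
--     arches.append('universal')
--     return arches
-- ===== Notes on version B (the rewrite author's own statement) =====
-- stated objective: simpler
-- what changed: Replaces A's recursive _supports_arch helper (re-evaluated per query, with recursion into group members) by a set of supported base arches precomputed once from the four version predicates, after which each check is a plain membership or set-intersection test.
import Mathlib
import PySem

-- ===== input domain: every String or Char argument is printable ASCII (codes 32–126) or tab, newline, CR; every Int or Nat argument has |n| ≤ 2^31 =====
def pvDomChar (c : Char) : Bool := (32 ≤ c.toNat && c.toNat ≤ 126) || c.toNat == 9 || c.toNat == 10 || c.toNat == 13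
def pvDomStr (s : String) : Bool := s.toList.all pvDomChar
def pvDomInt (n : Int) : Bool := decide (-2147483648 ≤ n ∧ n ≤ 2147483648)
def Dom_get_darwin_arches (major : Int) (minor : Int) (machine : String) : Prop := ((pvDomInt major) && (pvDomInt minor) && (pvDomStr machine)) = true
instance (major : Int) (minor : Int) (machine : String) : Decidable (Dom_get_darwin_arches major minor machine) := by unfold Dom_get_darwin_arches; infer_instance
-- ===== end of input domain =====

-- B replaces A's recursive _supports_arch helper by a precomputed set of supported
-- base arches plus direct membership/intersection tests (objective: simpler).

-- ===== PORT A =====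
-- groups tuple and groups_dict from A, as constants
def pvGroupsA : List String := ["fat", "intel", "fat64", "fat32"]
def pvGroupsDictA : PySem.Dict String (List String) := PySem.Dict.ofList
  [("fat", ["i386", "ppc"]), ("intel", ["x86_64", "i386"]),
   ("fat64", ["x86_64", "ppc64"]), ("fat32", ["x86_64", "i386", "ppc"])]

-- _supports_arch; the inner `for garch in groups_dict[arch]` recursion is ported
-- with a fuel counter (recursion depth in A is at most 2, so fuel 1 at the top suffices);
-- tuple comparisons (major, minor) <= (10, 5) etc. are written out lexicographically.
def pvSupportsArchA (major minor : Int) : Nat → String → Bool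
  | fuel, arch =>
    if arch == "ppc" then decide (major < 10 ∨ (major = 10 ∧ minor ≤ 5))
    else if arch == "ppc64" then decide (major = 10 ∧ minor = 5)
    else if arch == "i386" then decide (10 < major ∨ (major = 10 ∧ 4 ≤ minor))
    else if arch == "x86_64" then decide (10 < major ∨ (major = 10 ∧ 4 ≤ minor))
    else if pvGroupsA.contains arch then
      match fuel with
      | 0 => false
      | f + 1 => (pvGroupsDictA.getD arch []).any (pvSupportsArchA major minor f)
    else false

def get_darwin_arches (major : Int) (minor : Int) (machine : String) : List String :=
  let arches : List String := []
  let arches := if pvSupportsArchA major minor 1 machine then arches ++ [machine] else arches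
  let arches := pvGroupsA.foldl (fun acc garch =>
    if (pvGroupsDictA.getD garch []).contains machine && pvSupportsArchA major minor 1 garch then
      acc ++ [garch] else acc) arches
  arches ++ ["universal"]

-- ===== PORT B =====
def pvGroupsB : List (String × List String) :=
  [("fat", ["i386", "ppc"]), ("intel", ["x86_64", "i386"]),
   ("fat64", ["x86_64", "ppc64"]), ("fat32", ["x86_64", "i386", "ppc"])]

-- the precomputed set of supported base arches
def pvSupportedB (major minor : Int) : PySem.Set String :=
  let s : PySem.Set String := PySem.Set.ofList []
  let s := if decide (major < 10 ∨ (major = 10 ∧ minor ≤ 5)) then s.add "ppc" else s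
  let s := if decide (major = 10 ∧ minor = 5) then s.add "ppc64" else s
  let s := if decide (10 < major ∨ (major = 10 ∧ 4 ≤ minor)) then (s.add "i386").add "x86_64" else s
  s

-- supported.intersection(members) is truthy iff some member is in the set
def pvIntersects (s : PySem.Set String) (members : List String) : Bool :=
  members.any (fun m => s.contains m)

def get_darwin_arches_alt (major : Int) (minor : Int) (machine : String) : List String :=
  let supported := pvSupportedB major minor
  let gd : PySem.Dict String (List String) := PySem.Dict.ofList pvGroupsB
  let arches : List String := []
  let arches :=
    if supported.contains machine ||
       ((gd.get? machine).isSome && pvIntersects supported (gd.getD machine [])) then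
      arches ++ [machine] else arches
  let arches := pvGroupsB.foldl (fun acc nm =>
    if nm.2.contains machine && pvIntersects supported nm.2 then acc ++ [nm.1] else acc) arches
  arches ++ ["universal"]

-- ===== PRECONDITION & SPEC =====
def Spec_get_darwin_arches (major : Int) (minor : Int) (machine : String) (out : List String) : Prop := out = get_darwin_arches_alt major minor machine
instance (major : Int) (minor : Int) (machine : String) (out : List String) : Decidable (Spec_get_darwin_arches major minor machine out) := by unfold Spec_get_darwin_arches; infer_instance

-- ===== CLAIM (what is proved, stated in full; the proofs are below) =====
def Claim_equal_get_darwin_arches : Prop := ∀ (major : Int) (minor : Int) (machine : String), Dom_get_darwin_arches major minor machine → Spec_get_darwin_arches major minor machine (get_darwin_arches major minor machine)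

-- ===== LEMMAS AND PROOFS =====
-- proof-only helpers: the two programs with the three version conditions abstracted to Booleans
def pvSupA (a b c : Bool) : Nat → String → Bool
  | fuel, arch =>
    if arch == "ppc" then a
    else if arch == "ppc64" then b
    else if arch == "i386" then c
    else if arch == "x86_64" then c
    else if pvGroupsA.contains arch then
      match fuel with
      | 0 => false
      | f + 1 => (pvGroupsDictA.getD arch []).any (pvSupA a b c f)
    else false

def pvCoreA (a b c : Bool) (machine : String) : List String :=
  let arches : List String := []
  let arches := if pvSupA a b c 1 machine then arches ++ [machine] else arches
  let arches := pvGroupsA.foldl (fun acc garch =>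
    if (pvGroupsDictA.getD garch []).contains machine && pvSupA a b c 1 garch then
      acc ++ [garch] else acc) arches
  arches ++ ["universal"]

def pvSuppB (a b c : Bool) : PySem.Set String :=
  let s : PySem.Set String := PySem.Set.ofList []
  let s := if a then s.add "ppc" else s
  let s := if b then s.add "ppc64" else s
  let s := if c then (s.add "i386").add "x86_64" else s
  s

def pvCoreB (a b c : Bool) (machine : String) : List String :=
  let supported := pvSuppB a b c
  let gd : PySem.Dict String (List String) := PySem.Dict.ofList pvGroupsB
  let arches : List String := []
  let arches :=
    if supported.contains machine ||
       ((gd.get? machine).isSome && pvIntersects supported (gd.getD machine [])) then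
      arches ++ [machine] else arches
  let arches := pvGroupsB.foldl (fun acc nm =>
    if nm.2.contains machine && pvIntersects supported nm.2 then acc ++ [nm.1] else acc) arches
  arches ++ ["universal"]

lemma supA_eq (major minor : Int) : ∀ (fuel : Nat) (arch : String),
    pvSupportsArchA major minor fuel arch
      = pvSupA (decide (major < 10 ∨ (major = 10 ∧ minor ≤ 5)))
               (decide (major = 10 ∧ minor = 5))
               (decide (10 < major ∨ (major = 10 ∧ 4 ≤ minor))) fuel arch := by
  intro fuel
  induction fuel with
  | zero => intro arch; rfl
  | succ f ih =>
    intro arch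
    simp only [pvSupportsArchA, pvSupA]
    split_ifs <;> simp [List.any_eq, ih]

lemma coreA_eq (major minor : Int) (machine : String) :
    get_darwin_arches major minor machine
      = pvCoreA (decide (major < 10 ∨ (major = 10 ∧ minor ≤ 5)))
                (decide (major = 10 ∧ minor = 5))
                (decide (10 < major ∨ (major = 10 ∧ 4 ≤ minor))) machine := by
  simp only [get_darwin_arches, pvCoreA, supA_eq]

lemma coreB_eq (major minor : Int) (machine : String) :
    get_darwin_arches_alt major minor machine
      = pvCoreB (decide (major < 10 ∨ (major = 10 ∧ minor ≤ 5)))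
                (decide (major = 10 ∧ minor = 5))
                (decide (10 < major ∨ (major = 10 ∧ 4 ≤ minor))) machine := by
  rfl

lemma core_eq (a b c : Bool) (machine : String) :
    pvCoreA a b c machine = pvCoreB a b c machine := by
  by_cases h1 : machine = "ppc"
  · subst h1; revert a b c; decide
  by_cases h2 : machine = "ppc64"
  · subst h2; revert a b c; decide
  by_cases h3 : machine = "i386"
  · subst h3; revert a b c; decide
  by_cases h4 : machine = "x86_64"
  · subst h4; revert a b c; decide
  by_cases h5 : machine = "fat"
  · subst h5; revert a b c; decide
  by_cases h6 : machine = "intel"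
  · subst h6; revert a b c; decide
  by_cases h7 : machine = "fat64"
  · subst h7; revert a b c; decide
  by_cases h8 : machine = "fat32"
  · subst h8; revert a b c; decide
  · have e1 : (pvGroupsDictA).getD "fat" [] = ["i386", "ppc"] := rfl
    have e2 : (pvGroupsDictA).getD "intel" [] = ["x86_64", "i386"] := rfl
    have e3 : (pvGroupsDictA).getD "fat64" [] = ["x86_64", "ppc64"] := rfl
    have e4 : (pvGroupsDictA).getD "fat32" [] = ["x86_64", "i386", "ppc"] := rfl
    have e5 : (PySem.Dict.ofList
        [("fat", ["i386", "ppc"]), ("intel", ["x86_64", "i386"]), ("fat64", ["x86_64", "ppc64"]),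
         ("fat32", ["x86_64", "i386", "ppc"])] : PySem.Dict String (List String)).get? machine
        = none := by
      simp [PySem.Dict.ofList, PySem.Dict.update, List.foldl,
        PySem.Dict.get?_insert, h5, h6, h7, h8]
    have e6 : machine ∉ pvSuppB a b c := by
      cases a <;> cases b <;> cases c <;>
        simp [pvSuppB, PySem.Set.add, PySem.Set.ofList, PySem.Set.contains, h1, h2, h3, h4]
    simp [pvCoreA, pvCoreB, pvSupA, pvGroupsA, pvGroupsB, pvIntersects,
      e1, e2, e3, e4, e5, e6, h1, h2, h3, h4, h5, h6, h7, h8, List.foldl]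

-- ===== VERDICT (by name: the statement is the Claim_ definition above) =====
theorem get_darwin_arches_spec : Claim_equal_get_darwin_arches := by
  intro major minor machine _
  unfold Spec_get_darwin_arches
  rw [coreA_eq, coreB_eq, core_eq]
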